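-- pv_equiv track=rewrite | github.com/hydenny/- | 11번가/2.py | solution
-- ===== SOURCE A (Python) =====
-- def solution(S):
--     # write your code in Python 3.6
--     pivot = 0
--
--     S = list(S)
--
--     lengths = []
--     length = 1
--
--     while S:
--         if len(S) >= 2:
--             if S[-1] == S[-2]:
--                 length += 1
--             else:
--                 lengths.append(length)
--                 length = 1
--         else:
--             lengths.append(length)
--         S.pop()
--
--     result = []
--     for i in lengths:
--         result.append(max(lengths) - i)
--     return sum(result)
-- ===== SOURCE B (Python) =====
-- def solution(S):
--     # One forward pass: count runs and the longest run; answer = runs*best - len(S).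
--     runs = 0
--     best = 0
--     cur = 0
--     prev = None
--     for ch in S:
--         if ch == prev:
--             cur += 1
--         else:
--             runs += 1
--             cur = 1
--             prev = ch
--         if cur > best:
--             best = cur
--     return runs * best - len(S)
-- ===== Notes on version B (the rewrite author's own statement) =====
-- stated objective: faster
-- what changed: Single forward pass counting runs and the longest run, returning runs*best - len(S), instead of popping the string element by element, recomputing max(lengths) inside the output loop and summing a built list.
import Mathlib
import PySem

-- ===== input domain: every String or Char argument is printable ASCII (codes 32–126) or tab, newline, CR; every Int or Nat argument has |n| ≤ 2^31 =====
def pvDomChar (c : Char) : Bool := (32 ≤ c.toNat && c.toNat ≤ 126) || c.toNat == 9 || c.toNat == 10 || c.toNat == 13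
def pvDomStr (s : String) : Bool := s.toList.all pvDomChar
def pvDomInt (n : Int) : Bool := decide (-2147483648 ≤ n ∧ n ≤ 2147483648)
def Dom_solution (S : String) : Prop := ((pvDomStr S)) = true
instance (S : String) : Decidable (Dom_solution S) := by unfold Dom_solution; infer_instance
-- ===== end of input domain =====

-- B replaces A's element-by-element popping plus a second max-recomputing loop by a
-- single forward pass counting runs and the longest run, returning runs*best - len(S).

-- ===== PORT A =====
-- while S: inspect S[-1], S[-2], collect run lengths, S.pop()
def solutionLoop : List Char → List Int → Int → List Int
  | [], lengths, _ => lengths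
  | h :: t, lengths, length =>
    if (h :: t).length ≥ 2 then
      if PySem.List.pyGet? (h :: t) (-1) = PySem.List.pyGet? (h :: t) (-2) then
        solutionLoop (h :: t).dropLast lengths (length + 1)
      else
        solutionLoop (h :: t).dropLast (lengths ++ [length]) 1
    else
      solutionLoop (h :: t).dropLast (lengths ++ [length]) length
  termination_by S _ _ => S.length
  decreasing_by all_goals simp [List.length_dropLast]

def solution (S : String) : Int :=
  let lengths := solutionLoop S.toList [] 1
  let result := lengths.foldl
    (fun acc i => acc ++ [(PySem.List.max? lengths (fun x => x)).getD 0 - i]) ([] : List Int)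
  result.sum

-- ===== PORT B =====
-- for ch in S: maintain runs, best, cur, prev
def solutionAltLoop : List Char → Int → Int → Int → Option Char → Int × Int
  | [], runs, best, _, _ => (runs, best)
  | ch :: rest, runs, best, cur, prev =>
    if some ch = prev then
      solutionAltLoop rest runs (if cur + 1 > best then cur + 1 else best) (cur + 1) prev
    else
      solutionAltLoop rest (runs + 1) (if 1 > best then 1 else best) 1 (some ch)

def solution_alt (S : String) : Int :=
  (solutionAltLoop S.toList 0 0 0 none).1 * (solutionAltLoop S.toList 0 0 0 none).2 -
    PySem.Str.len S

-- ===== PRECONDITION & SPEC =====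
def Spec_solution (S : String) (out : Int) : Prop := out = solution_alt S
instance (S : String) (out : Int) : Decidable (Spec_solution S out) := by unfold Spec_solution; infer_instance

-- ===== CLAIM (what is proved, stated in full; the proofs are below) =====
def Claim_equal_solution : Prop := ∀ (S : String), Dom_solution S → Spec_solution S (solution S)

-- ===== LEMMAS AND PROOFS =====

-- run-length list of a string (front to back)
def runLengths : List Char → List Int
  | [] => []
  | [_] => [1]
  | c :: d :: r => if c = d then
      match runLengths (d :: r) with
      | [] => []
      | h :: t => (h + 1) :: t
    else 1 :: runLengths (d :: r)

def addHead (k : Int) : List Int → List Int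
  | [] => []
  | h :: t => (h + k) :: t

def addLast (k : Int) : List Int → List Int
  | [] => []
  | [h] => [h + k]
  | h :: t => h :: addLast k t

lemma runLengths_cons_cons (c d : Char) (r : List Char) :
    runLengths (c :: d :: r) =
      if c = d then addHead 1 (runLengths (d :: r)) else 1 :: runLengths (d :: r) := by
  rw [runLengths]
  rcases h : runLengths (d :: r) with _ | ⟨x, t⟩ <;> (first | simp [addHead] | skip)

lemma runLengths_cons (c : Char) (l : List Char) :
    ∃ h t, runLengths (c :: l) = h :: t ∧ 1 ≤ h := by
  induction l generalizing c with
  | nil => exact ⟨1, [], rfl, le_refl 1⟩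
  | cons d r ih =>
    rw [runLengths_cons_cons]
    obtain ⟨h, t, heq, hpos⟩ := ih d
    by_cases hcd : c = d
    · exact ⟨h + 1, t, by simp [hcd, heq, addHead], by omega⟩
    · exact ⟨1, runLengths (d :: r), by simp [hcd], le_refl 1⟩

lemma runLengths_pos (l : List Char) : ∀ x ∈ runLengths l, 1 ≤ x := by
  induction l with
  | nil => simp [runLengths]
  | cons c t ih =>
    cases t with
    | nil => simp [runLengths]
    | cons d r =>
      rw [runLengths_cons_cons]
      obtain ⟨h, t', heq, hpos⟩ := runLengths_cons d r
      by_cases hcd : c = d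
      · simp only [hcd, heq, addHead]
        intro x hx
        rcases List.mem_cons.mp hx with hx | hx
        · have := ih h (by rw [heq]; exact List.mem_cons_self)
          omega
        · exact ih x (by rw [heq]; exact List.mem_cons_of_mem _ hx)
      · simp only [if_neg hcd]
        intro x hx
        rcases List.mem_cons.mp hx with hx | hx
        · omega
        · exact ih x hx

lemma sum_runLengths (l : List Char) : (runLengths l).sum = l.length := by
  induction l with
  | nil => simp [runLengths]
  | cons c t ih =>
    cases t with
    | nil => simp [runLengths]
    | cons d r =>
      rw [runLengths_cons_cons]
      obtain ⟨h, t', heq, _⟩ := runLengths_cons d r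
      by_cases hcd : c = d
      · simp only [hcd, heq, addHead]
        have := ih; rw [heq] at this; simp [List.sum_cons] at this
        simp [List.length_cons]
        omega
      · simp only [if_neg hcd, List.sum_cons, ih]
        simp [List.length_cons]
        omega

lemma addHead_addHead (j k : Int) (x : List Int) :
    addHead k (addHead j x) = addHead (j + k) x := by
  cases x <;> simp [addHead] <;> ring

lemma addHead_zero (x : List Int) : addHead 0 x = x := by
  cases x <;> simp [addHead]

lemma addHead_length (k : Int) (x : List Int) : (addHead k x).length = x.length := by
  cases x <;> simp [addHead]

lemma addLast_cons_of_ne_nil (k : Int) (h : Int) (t : List Int) (ht : t ≠ []) :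
    addLast k (h :: t) = h :: addLast k t := by
  cases t with
  | nil => exact absurd rfl ht
  | cons a t' => rfl

lemma addLast_append_singleton (k y : Int) (x : List Int) :
    addLast k (x ++ [y]) = x ++ [y + k] := by
  induction x with
  | nil => simp [addLast]
  | cons h t ih =>
    rw [List.cons_append, addLast_cons_of_ne_nil k h (t ++ [y]) (by simp), ih, List.cons_append]

lemma addHead_reverse (k : Int) (x : List Int) :
    (addHead k x).reverse = addLast k x.reverse := by
  cases x with
  | nil => simp [addHead, addLast]
  | cons h t => simp [addHead, addLast_append_singleton]

lemma addLast_addHead (k j : Int) (x : List Int) :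
    addLast k (addHead j x) = addHead j (addLast k x) := by
  cases x with
  | nil => simp [addHead, addLast]
  | cons h t =>
    cases t with
    | nil => simp [addHead, addLast]; ring
    | cons a t' =>
      rw [addHead, addLast_cons_of_ne_nil k (h + j) (a :: t') (by simp),
        addLast_cons_of_ne_nil k h (a :: t') (by simp), addHead]

lemma addHead_append_of_ne_nil (k : Int) (x y : List Int) (hx : x ≠ []) :
    addHead k (x ++ y) = addHead k x ++ y := by
  cases x with
  | nil => exact absurd rfl hx
  | cons h t => simp [addHead]

lemma runLengths_concat (l : List Char) (d c : Char) :
    runLengths ((l ++ [d]) ++ [c]) =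
      if d = c then addLast 1 (runLengths (l ++ [d])) else runLengths (l ++ [d]) ++ [1] := by
  induction l with
  | nil =>
    by_cases hdc : d = c <;>
      simp [hdc, runLengths_cons_cons, runLengths, addHead, addLast]
  | cons a t ih =>
    have hne : t ++ [d] ≠ [] := by simp
    obtain ⟨b, t', hbt⟩ : ∃ b t', t ++ [d] = b :: t' := by
      cases h : t ++ [d] with
      | nil => exact absurd h hne
      | cons b t' => exact ⟨b, t', rfl⟩
    have h1 : (a :: t ++ [d]) ++ [c] = a :: b :: (t' ++ [c]) := by
      simp [hbt]
    have h2 : (a :: t) ++ [d] = a :: b :: t' := by simp [hbt]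
    have h3 : (t ++ [d]) ++ [c] = b :: (t' ++ [c]) := by simp [hbt]
    obtain ⟨rh, rt, hr, _⟩ := runLengths_cons b t'
    rw [show ((a :: t) ++ [d]) ++ [c] = a :: b :: (t' ++ [c]) by simpa using h1]
    rw [runLengths_cons_cons a b (t' ++ [c]), show b :: (t' ++ [c]) = (t ++ [d]) ++ [c] from h3.symm, ih]
    rw [h2, runLengths_cons_cons a b t']
    by_cases hdc : d = c <;> by_cases hab : a = b
    · simp only [if_pos hdc, if_pos hab, addLast_addHead]
      rw [hbt]
    · simp only [if_pos hdc, if_neg hab,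
        addLast_cons_of_ne_nil 1 1 (runLengths (b :: t')) (by simp [hr])]
      rw [show b :: t' = t ++ [d] from hbt.symm]
    · simp only [if_neg hdc, if_pos hab]
      rw [show b :: t' = t ++ [d] from hbt.symm] at hr ⊢
      rw [addHead_append_of_ne_nil 1 (runLengths (t ++ [d])) [1] (by simp [hr])]
    · simp only [if_neg hdc, if_neg hab, List.cons_append]
      rw [hbt]

lemma runLengths_reverse (l : List Char) :
    runLengths l.reverse = (runLengths l).reverse := by
  induction l with
  | nil => simp [runLengths]
  | cons c t ih =>
    cases t with
    | nil => simp [runLengths]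
    | cons d r =>
      have h1 : (c :: d :: r).reverse = (r.reverse ++ [d]) ++ [c] := by simp
      have h2 : (d :: r).reverse = r.reverse ++ [d] := by simp
      rw [h1, runLengths_concat, ← h2, ih, runLengths_cons_cons]
      by_cases hdc : d = c
      · simp [hdc, addHead_reverse]
      · have : ¬ c = d := fun h => hdc h.symm
        simp [hdc, this]

-- A's while loop, characterised on a reversed list
lemma solutionLoop_spec (r : List Char) : ∀ (c : Char) (L : List Int) (l : Int),
    solutionLoop (c :: r).reverse L l = L ++ addHead (l - 1) (runLengths (c :: r)) := by
  induction r with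
  | nil =>
    intro c L l
    rw [show (c :: ([] : List Char)).reverse = [c] by simp, solutionLoop]
    simp [solutionLoop, runLengths, addHead]
  | cons d rest ih =>
    intro c L l
    have hS : (c :: d :: rest).reverse = (rest.reverse ++ [d]) ++ [c] := by simp
    rw [hS]
    obtain ⟨h0, t0, hht⟩ : ∃ h0 t0, (rest.reverse ++ [d]) ++ [c] = h0 :: t0 := by
      cases h : (rest.reverse ++ [d]) ++ [c] with
      | nil => simp at h
      | cons h0 t0 => exact ⟨h0, t0, rfl⟩
    rw [hht, solutionLoop, ← hht]
    have hlen : ((rest.reverse ++ [d]) ++ [c]).length ≥ 2 := by simp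
    have hg1 : PySem.List.pyGet? ((rest.reverse ++ [d]) ++ [c]) (-1) = some c :=
      PySem.List.pyGet?_neg_one_append_singleton (rest.reverse ++ [d]) c
    have hg2 : PySem.List.pyGet? ((rest.reverse ++ [d]) ++ [c]) (-2) = some d := by
      rw [PySem.List.pyGet?_neg_ofNat _ 2 (by omega) (by simp)]
      have hlen2 : ((rest.reverse ++ [d]) ++ [c]).length - 2 = rest.reverse.length := by
        simp
      rw [hlen2, List.append_assoc, List.getElem?_append_right (le_refl _)]
      simp
    have hdrop : ((rest.reverse ++ [d]) ++ [c]).dropLast = (d :: rest).reverse := by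
      simp
    rw [if_pos hlen, hg1, hg2, hdrop]
    rw [runLengths_cons_cons]
    by_cases hcd : c = d
    · rw [if_pos (by simp [hcd]), ih d L (l + 1), if_pos hcd]
      rw [addHead_addHead]
      congr 1
      ring_nf
    · rw [if_neg (by simp [hcd]), ih d (L ++ [l]) 1, if_neg hcd]
      obtain ⟨h, t, heq, _⟩ := runLengths_cons d rest
      rw [show (1 : Int) - 1 = 0 by ring, heq, addHead_zero]
      have : addHead (l - 1) (1 :: h :: t) = l :: h :: t := by
        simp [addHead]; try ring
      rw [this, List.append_assoc]
      rfl

-- max-fold facts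
lemma foldl_max_comm (l : List Int) : ∀ (a b : Int),
    l.foldl max (max a b) = max a (l.foldl max b) := by
  induction l with
  | nil => intro a b; rfl
  | cons x t ih =>
    intro a b
    simp only [List.foldl_cons]
    rw [max_assoc, ih]

lemma foldl_max_reverse (l : List Int) : ∀ (b : Int),
    l.reverse.foldl max b = l.foldl max b := by
  induction l with
  | nil => intro b; rfl
  | cons c t ih =>
    intro b
    simp only [List.reverse_cons, List.foldl_append, List.foldl_cons, List.foldl_nil, ih,
      List.foldl_cons]
    rw [max_comm b c, foldl_max_comm t c b, max_comm]

lemma ite_gt_max (a b : Int) : (if a > b then a else b) = max b a := by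
  rw [max_def]; split_ifs <;> omega

-- B's for loop, characterised
lemma solutionAltLoop_spec (l : List Char) : ∀ (c : Char) (runs best cur : Int),
    1 ≤ cur → cur ≤ best →
    solutionAltLoop l runs best cur (some c) =
      (runs + ((runLengths (c :: l)).length : Int) - 1,
       (addHead (cur - 1) (runLengths (c :: l))).foldl max best) := by
  induction l with
  | nil =>
    intro c runs best cur h1 h2
    simp [solutionAltLoop, runLengths, addHead]
    omega
  | cons d r ih =>
    intro c runs best cur h1 h2
    rw [solutionAltLoop]
    obtain ⟨h, t, heq, hpos⟩ := runLengths_cons d r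
    by_cases hdc : d = c
    · rw [if_pos (by rw [hdc]), ite_gt_max,
        ih c runs (max best (cur + 1)) (cur + 1) (by omega) (le_max_right _ _)]
      rw [runLengths_cons_cons, if_pos hdc.symm, ← hdc, addHead_length, addHead_addHead]
      rw [show cur + 1 - 1 = cur by ring, show (1 : Int) + (cur - 1) = cur by ring, heq]
      simp only [addHead, List.foldl_cons]
      congr 2
      rw [max_assoc]
      congr 1
      exact max_eq_right (by omega)
    · rw [if_neg (by simp [hdc]), ite_gt_max, show max best 1 = best by omega,
        ih d (runs + 1) best 1 (le_refl 1) (by omega)]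
      rw [runLengths_cons_cons, if_neg (fun h' => hdc h'.symm)]
      simp only [Prod.mk.injEq]
      constructor
      · simp only [List.length_cons]
        push_cast
        ring
      · rw [show (1 : Int) - 1 = 0 by ring, addHead_zero]
        simp only [addHead, List.foldl_cons]
        rw [show (1 : Int) + (cur - 1) = cur by ring, show max best cur = best by omega]

lemma solution_alt_eq (S : String) :
    solution_alt S = ((runLengths S.toList).length : Int) *
      ((runLengths S.toList).foldl max 0) - (S.toList.length : Int) := by
  unfold solution_alt
  rw [show PySem.Str.len S = (S.toList.length : Int) from by simp [PySem.Str.len]]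
  cases h : S.toList with
  | nil => simp [solutionAltLoop, runLengths]
  | cons c rest =>
    rw [solutionAltLoop, if_neg (by simp)]
    rw [ite_gt_max, show max (0 : Int) 1 = 1 by omega, show (0 : Int) + 1 = 1 by ring,
      solutionAltLoop_spec rest c 1 1 1 (le_refl 1) (le_refl 1)]
    obtain ⟨hh, tt, heq, hpos⟩ := runLengths_cons c rest
    rw [show (1 : Int) - 1 = 0 by ring, addHead_zero, heq]
    simp only [List.foldl_cons]
    rw [show max 1 hh = hh by omega, show max 0 hh = hh by omega]
    push_cast
    ring_nf

lemma sum_map_sub (M : Int) (L : List Int) :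
    (L.map (fun i => M - i)).sum = (L.length : Int) * M - L.sum := by
  induction L with
  | nil => simp
  | cons h t ih =>
    simp only [List.map_cons, List.sum_cons, ih, List.length_cons]
    push_cast
    ring

lemma solution_eq (S : String) :
    solution S = ((runLengths S.toList).length : Int) *
      ((runLengths S.toList).foldl max 0) - (S.toList.length : Int) := by
  unfold solution
  dsimp only
  have hlengths : solutionLoop S.toList [] 1 = (runLengths S.toList).reverse := by
    cases h : S.toList.reverse with
    | nil =>
      have : S.toList = [] := by simpa using congrArg List.reverse h
      rw [this]
      simp [solutionLoop, runLengths]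
    | cons c r =>
      have hS : S.toList = (c :: r).reverse := by
        have := congrArg List.reverse h
        simpa using this
      rw [hS, solutionLoop_spec r c [] 1, show (1 : Int) - 1 = 0 by ring, addHead_zero,
        runLengths_reverse (c :: r), List.reverse_reverse, List.nil_append]
  rw [hlengths, PySem.List.foldl_append_singleton_eq_map, List.nil_append, sum_map_sub]
  rw [List.length_reverse, List.sum_reverse, sum_runLengths]
  congr 1
  cases hrl : (runLengths S.toList).reverse with
  | nil =>
    have : runLengths S.toList = [] := by simpa using congrArg List.reverse hrl
    simp [this, PySem.List.max?]
  | cons h t =>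
    rw [PySem.List.max?_id_cons]
    have hmem : h ∈ runLengths S.toList := by
      have : h ∈ (runLengths S.toList).reverse := by rw [hrl]; exact List.mem_cons_self
      simpa using this
    have hpos : 1 ≤ h := runLengths_pos S.toList h hmem
    have : (runLengths S.toList).foldl max 0 = (h :: t).foldl max 0 := by
      rw [← foldl_max_reverse, hrl]
    rw [this]
    simp only [List.foldl_cons, Option.getD_some]
    rw [show max 0 h = h by omega]

-- ===== VERDICT (by name: the statement is the Claim_ definition above) =====
theorem solution_spec : Claim_equal_solution := by
  intro S _
  unfold Spec_solution
  rw [solution_eq, solution_alt_eq]
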